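-- pv_equiv track=rewrite | github.com/zulqarnaininfo/learning-bioinformatics | year-1/dna-cleaner-v2/dna_cleaner_v2.py | dna_cleaner
-- ===== SOURCE A (Python) =====
-- def dna_cleaner(dirty_dna):
--     clean = ""
--     invalid_count = 0
--     for base in dirty_dna:
--         if base in ["A","T","G","C"]:
--             clean += base
--         else:
--             invalid_count += 1
--     return clean, invalid_count
-- ===== SOURCE B (Python) =====
-- def dna_cleaner(dirty_dna):
--     if len(dirty_dna) == 0:
--         return "", 0
--     if len(dirty_dna) == 1:
--         if dirty_dna in ("A", "T", "G", "C"):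
--             return dirty_dna, 0
--         return "", 1
--     mid = len(dirty_dna) // 2
--     left_clean, left_bad = dna_cleaner(dirty_dna[:mid])
--     right_clean, right_bad = dna_cleaner(dirty_dna[mid:])
--     return left_clean + right_clean, left_bad + right_bad
-- ===== Notes on version B (the rewrite author's own statement) =====
-- stated objective: alternative
-- what changed: B replaces A's linear scan with an explicit counter by a divide-and-conquer recursion: split the string in halves, clean each half recursively, and combine by concatenating the clean parts and adding the invalid counts.
import Mathlib
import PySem

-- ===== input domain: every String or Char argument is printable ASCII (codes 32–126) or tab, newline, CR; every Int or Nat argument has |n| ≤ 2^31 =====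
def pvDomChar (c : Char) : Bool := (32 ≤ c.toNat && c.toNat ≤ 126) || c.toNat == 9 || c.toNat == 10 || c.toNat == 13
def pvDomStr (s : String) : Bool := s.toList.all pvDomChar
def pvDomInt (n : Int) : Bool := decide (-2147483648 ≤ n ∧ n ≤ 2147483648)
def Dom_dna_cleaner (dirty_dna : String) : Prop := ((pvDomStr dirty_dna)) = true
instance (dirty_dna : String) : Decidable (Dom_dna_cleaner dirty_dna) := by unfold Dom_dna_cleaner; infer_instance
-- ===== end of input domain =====

-- B replaces A's linear scan with a counter by a divide-and-conquer recursion on string halves (objective: alternative).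

-- ===== PORT A =====
-- Port of A: fold over the characters, appending valid bases, counting invalid ones.
def dna_cleaner (dirty_dna : String) : String × Int :=
  let st := dirty_dna.toList.foldl
    (fun (acc : List Char × Int) base =>
      if base ∈ ['A', 'T', 'G', 'C'] then (acc.1 ++ [base], acc.2)
      else (acc.1, acc.2 + 1))
    ([], 0)
  (String.ofList st.1, st.2)

-- ===== PORT B =====
-- Port of B: divide and conquer — base cases for length 0/1, otherwise split at
-- mid = len // 2 (Python's s[:mid] / s[mid:] are PySem slices) and combine.
def dnaCleanerAltGo (s : List Char) : List Char × Int :=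
  if s.length = 0 then ([], 0)
  else if s.length = 1 then
    if s = ['A'] ∨ s = ['T'] ∨ s = ['G'] ∨ s = ['C'] then (s, 0) else ([], 1)
  else
    let mid : Nat := s.length / 2
    let l := dnaCleanerAltGo (PySem.List.slice s none (some (mid : Int)))
    let r := dnaCleanerAltGo (PySem.List.slice s (some (mid : Int)) none)
    (l.1 ++ r.1, l.2 + r.2)
termination_by s.length
decreasing_by
  · rw [PySem.List.slice_to_natCast]; simp [List.length_take]; omega
  · rw [PySem.List.slice_from_natCast]; simp [List.length_drop]; omega

def dna_cleaner_alt (dirty_dna : String) : String × Int :=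
  let r := dnaCleanerAltGo dirty_dna.toList
  (String.ofList r.1, r.2)

-- ===== PRECONDITION & SPEC =====
def Spec_dna_cleaner (dirty_dna : String) (out : String × Int) : Prop := out = dna_cleaner_alt dirty_dna
instance (dirty_dna : String) (out : String × Int) : Decidable (Spec_dna_cleaner dirty_dna out) := by unfold Spec_dna_cleaner; infer_instance

-- ===== CLAIM (what is proved, stated in full; the proofs are below) =====
def Claim_equal_dna_cleaner : Prop := ∀ (dirty_dna : String), Dom_dna_cleaner dirty_dna → Spec_dna_cleaner dirty_dna (dna_cleaner dirty_dna)

-- ===== LEMMAS AND PROOFS =====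

-- A's loop computes the filtered string and the number of rejected characters.
theorem dna_cleaner_loop (l : List Char) (s : List Char) (n : Int) :
    l.foldl
      (fun (acc : List Char × Int) base =>
        if base ∈ ['A', 'T', 'G', 'C'] then (acc.1 ++ [base], acc.2)
        else (acc.1, acc.2 + 1))
      (s, n)
    = (s ++ l.filter (fun b => b ∈ ['A', 'T', 'G', 'C']),
       n + ((l.length : Int) - (l.filter (fun b => b ∈ ['A', 'T', 'G', 'C'])).length)) := by
  induction l generalizing s n with
  | nil => simp
  | cons c l ih =>
    have hle : (l.filter (fun b => decide (b ∈ ['A', 'T', 'G', 'C']))).length ≤ l.length :=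
      List.length_filter_le _ _
    rw [List.foldl_cons]
    by_cases h : c ∈ ['A', 'T', 'G', 'C'] <;>
      simp only [h, if_true, if_false, ih, List.filter_cons, decide_true, decide_false,
        Prod.mk.injEq, List.length_cons, List.append_assoc, List.singleton_append] <;>
      refine ⟨by simp, ?_⟩ <;> push_cast <;> omega

-- B's recursion computes the same pair, by strong induction on the length.
theorem dnaCleanerAltGo_spec (s : List Char) :
    dnaCleanerAltGo s
      = (s.filter (fun b => b ∈ ['A', 'T', 'G', 'C']),
         (s.length : Int) - (s.filter (fun b => b ∈ ['A', 'T', 'G', 'C'])).length) := by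
  induction hn : s.length using Nat.strong_induction_on generalizing s with
  | _ n ih =>
  match s, hn with
  | [], hn => simp [dnaCleanerAltGo, ← hn]
  | [c], hn =>
    rw [dnaCleanerAltGo]
    simp only [List.length_cons, List.length_nil, Nat.zero_add, ← hn]
    norm_num
    by_cases h : c = 'A' ∨ c = 'T' ∨ c = 'G' ∨ c = 'C'
    · rw [if_pos (by simpa using h)]
      rcases h with rfl | rfl | rfl | rfl <;> simp
    · rw [if_neg (by simpa using h)]
      push_neg at h
      obtain ⟨ha, ht, hg, hc⟩ := h
      simp [ha, ht, hg, hc]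
  | c₁ :: c₂ :: t, hn =>
    rw [dnaCleanerAltGo]
    have hlen : (c₁ :: c₂ :: t).length ≠ 0 := by simp
    have hlen1 : (c₁ :: c₂ :: t).length ≠ 1 := by simp
    rw [if_neg hlen, if_neg hlen1]
    set s := c₁ :: c₂ :: t with hs
    set mid : Nat := s.length / 2 with hmid
    have hslt : PySem.List.slice s none (some (mid : Int)) = s.take mid :=
      PySem.List.slice_to_natCast ..
    have hsld : PySem.List.slice s (some (mid : Int)) none = s.drop mid :=
      PySem.List.slice_from_natCast ..
    have h2 : 2 ≤ s.length := by simp [hs]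
    have hl : (s.take mid).length < s.length ∧ (s.drop mid).length < s.length := by
      simp [List.length_take, List.length_drop]; omega
    simp only [hslt, hsld]
    rw [ih _ (hn ▸ hl.1) _ rfl, ih _ (hn ▸ hl.2) _ rfl]
    have happ := List.filter_append (p := fun b => decide (b ∈ ['A', 'T', 'G', 'C']))
      (l₁ := s.take mid) (l₂ := s.drop mid)
    rw [List.take_append_drop] at happ
    have hlt : (s.take mid).length + (s.drop mid).length = s.length := by
      simp [List.length_take, List.length_drop]; omega
    have hflen : ((s.take mid).filter (fun b => decide (b ∈ ['A', 'T', 'G', 'C']))).length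
        + ((s.drop mid).filter (fun b => decide (b ∈ ['A', 'T', 'G', 'C']))).length
        = (s.filter (fun b => decide (b ∈ ['A', 'T', 'G', 'C']))).length := by
      rw [happ, List.length_append]
    simp only [Prod.mk.injEq]
    constructor
    · exact happ.symm
    · rw [← hn]; push_cast [← hflen, ← hlt]; ring

-- ===== VERDICT (by name: the statement is the Claim_ definition above) =====
theorem dna_cleaner_spec : Claim_equal_dna_cleaner := by
  intro s _
  show _ = _
  unfold dna_cleaner dna_cleaner_alt
  rw [dna_cleaner_loop, dnaCleanerAltGo_spec]
  simp
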